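-- pv_equiv track=rewrite | github.com/Aunsiels/CSK | quasimodo/statement_maker.py | _correct_tokens
-- ===== SOURCE A (Python) =====
-- def _correct_tokens(tokens, pos):
--     merge_next = False
--     res_tokens = []
--     res_pos = []
--     for i in range(len(tokens)):
--         if tokens[i] == "-":
--             res_tokens[-1] = res_tokens[-1] + "-"
--             res_pos[-1] = (res_pos[-1][0] + "-", res_pos[-1][1])
--             merge_next = True
--         elif merge_next:
--             merge_next = False
--             res_tokens[-1] = res_tokens[-1] + tokens[i]
--             res_pos[-1] = (res_pos[-1][0] + pos[i][0], pos[i][1])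
--         else:
--             res_tokens.append(tokens[i])
--             res_pos.append(pos[i])
--     return res_tokens, res_pos
-- ===== SOURCE B (Python) =====
-- def _correct_tokens(tokens, pos):
--     # First pass: partition indices into groups; a new group starts at a
--     # non-dash token not preceded by a dash.
--     groups = []
--     for i in range(len(tokens)):
--         if tokens[i] != "-" and (i == 0 or tokens[i - 1] != "-"):
--             groups.append([i])
--         else:
--             groups[-1].append(i)
--     # Second pass: build each merged token and its pos tuple per group.
--     res_tokens = []
--     res_pos = []
--     for g in groups:
--         word = ""
--         tag0 = ""
--         tag1 = ""
--         for i in g: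
--             if tokens[i] == "-":
--                 word += "-"
--                 tag0 += "-"
--             else:
--                 word += tokens[i]
--                 tag0 += pos[i][0]
--                 tag1 = pos[i][1]
--         res_tokens.append(word)
--         res_pos.append((tag0, tag1))
--     return res_tokens, res_pos
-- ===== Notes on version B (the rewrite author's own statement) =====
-- stated objective: alternative
-- what changed: Replaces A's single stateful pass that destructively edits the last output slot via a merge_next flag with a two-pass decomposition: first group indices of hyphen-joined runs, then build each merged token and pos tuple once per group.
import Mathlib
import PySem

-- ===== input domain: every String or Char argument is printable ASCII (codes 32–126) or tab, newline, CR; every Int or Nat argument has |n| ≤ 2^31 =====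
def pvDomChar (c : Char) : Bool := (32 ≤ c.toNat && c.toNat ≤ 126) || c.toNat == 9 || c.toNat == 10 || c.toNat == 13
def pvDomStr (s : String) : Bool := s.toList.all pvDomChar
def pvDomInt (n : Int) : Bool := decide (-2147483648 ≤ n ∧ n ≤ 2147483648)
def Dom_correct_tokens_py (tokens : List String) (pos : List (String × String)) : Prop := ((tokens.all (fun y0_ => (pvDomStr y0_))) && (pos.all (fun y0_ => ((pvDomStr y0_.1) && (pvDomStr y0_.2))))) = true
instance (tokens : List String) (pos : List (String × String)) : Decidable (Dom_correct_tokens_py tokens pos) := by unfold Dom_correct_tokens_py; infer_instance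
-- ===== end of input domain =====

-- B replaces A's single stateful pass (merge_next flag, destructive edits of the last
-- output slot) with a two-pass decomposition: group indices first, then build each
-- merged token/pos once per group; alternative structure, same cost.

-- ===== PORT A =====
-- one loop iteration of A (list[-1] reads are total here via getLastD; the empty case
-- is reached only on inputs excluded by Pre_, where Python raises IndexError)
def ctAStep (tokens : List String) (pos : List (String × String))
    (st : List String × List (String × String) × Bool) (i : Nat) :
    List String × List (String × String) × Bool :=
  if tokens.getD i "" = "-" then
    (st.1.dropLast ++ [st.1.getLastD "" ++ "-"],
     st.2.1.dropLast ++ [((st.2.1.getLastD ("", "")).1 ++ "-", (st.2.1.getLastD ("", "")).2)],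
     true)
  else if st.2.2 then
    (st.1.dropLast ++ [st.1.getLastD "" ++ tokens.getD i ""],
     st.2.1.dropLast ++ [((st.2.1.getLastD ("", "")).1 ++ (pos.getD i ("", "")).1,
                          (pos.getD i ("", "")).2)],
     false)
  else
    (st.1 ++ [tokens.getD i ""], st.2.1 ++ [pos.getD i ("", "")], st.2.2)

def correct_tokens_py (tokens : List String) (pos : List (String × String)) :
    List String × (List (String × String)) :=
  let r := (List.range tokens.length).foldl (ctAStep tokens pos) ([], [], false)
  (r.1, r.2.1)

-- ===== PORT B =====
-- first pass of B: one step of the grouping loop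
def ctGStep (tokens : List String) (gs : List (List Nat)) (i : Nat) : List (List Nat) :=
  if tokens.getD i "" ≠ "-" ∧ (i = 0 ∨ tokens.getD (i - 1) "" ≠ "-") then gs ++ [[i]]
  else gs.dropLast ++ [gs.getLastD [] ++ [i]]

def ctGroups (tokens : List String) : List (List Nat) :=
  (List.range tokens.length).foldl (ctGStep tokens) []

-- second pass of B, inner loop: (word, tag0, tag1) for one group
def ctBuild (tokens : List String) (pos : List (String × String)) (g : List Nat) :
    String × String × String :=
  g.foldl (fun acc i =>
      if tokens.getD i "" = "-" then (acc.1 ++ "-", acc.2.1 ++ "-", acc.2.2)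
      else (acc.1 ++ tokens.getD i "", acc.2.1 ++ (pos.getD i ("", "")).1,
            (pos.getD i ("", "")).2))
    ("", "", "")

def correct_tokens_py_alt (tokens : List String) (pos : List (String × String)) :
    List String × (List (String × String)) :=
  (ctGroups tokens).foldl
    (fun r g => let b := ctBuild tokens pos g; (r.1 ++ [b.1], r.2 ++ [b.2]))
    ([], [])

-- ===== PRECONDITION & SPEC =====
-- Pre_ excludes exactly the inputs where Python A raises IndexError: a first token "-"
-- (list[-1] on the empty result), or a non-dash index with no pos entry (pos[i]).
def Pre_correct_tokens_py (tokens : List String) (pos : List (String × String)) : Prop :=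
  tokens.getD 0 "" ≠ "-" ∧
  ∀ i, i < tokens.length → tokens.getD i "" ≠ "-" → i < pos.length

instance (tokens : List String) (pos : List (String × String)) :
    Decidable (Pre_correct_tokens_py tokens pos) := by
  unfold Pre_correct_tokens_py; infer_instance

def pvWitness_correct_tokens_py : List String × (List (String × String)) :=
  (["non", "-", "violent", "protest"], [("JJ", "JJ"), ("-", "-"), ("JJ", "JJ"), ("NN", "NN")])

def Spec_correct_tokens_py (tokens : List String) (pos : List (String × String)) (out : List String × (List (String × String))) : Prop := out = correct_tokens_py_alt tokens pos
instance (tokens : List String) (pos : List (String × String)) (out : List String × (List (String × String))) : Decidable (Spec_correct_tokens_py tokens pos out) := by unfold Spec_correct_tokens_py; infer_instance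

-- ===== CLAIM (what is proved, stated in full; the proofs are below) =====
def Claim_equal_correct_tokens_py : Prop := ∀ (tokens : List String) (pos : List (String × String)), Dom_correct_tokens_py tokens pos → Pre_correct_tokens_py tokens pos → Spec_correct_tokens_py tokens pos (correct_tokens_py tokens pos)

-- ===== LEMMAS AND PROOFS =====

lemma ctBuild_concat (tokens : List String) (pos : List (String × String))
    (g : List Nat) (k : Nat) :
    ctBuild tokens pos (g ++ [k]) =
      (if tokens.getD k "" = "-" then
        ((ctBuild tokens pos g).1 ++ "-", (ctBuild tokens pos g).2.1 ++ "-",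
         (ctBuild tokens pos g).2.2)
      else
        ((ctBuild tokens pos g).1 ++ tokens.getD k "",
         (ctBuild tokens pos g).2.1 ++ (pos.getD k ("", "")).1,
         (pos.getD k ("", "")).2)) := by
  simp [ctBuild, List.foldl_append]

lemma ct_inv (tokens : List String) (pos : List (String × String))
    (h0 : tokens.getD 0 "" ≠ "-") (k : Nat) :
    (List.range k).foldl (ctAStep tokens pos) ([], [], false) =
      (((List.range k).foldl (ctGStep tokens) []).map (fun g => (ctBuild tokens pos g).1),
       ((List.range k).foldl (ctGStep tokens) []).map (fun g => (ctBuild tokens pos g).2),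
       decide (0 < k ∧ tokens.getD (k - 1) "" = "-")) ∧
    (0 < k → (List.range k).foldl (ctGStep tokens) [] ≠ []) := by
  induction k with
  | zero => simp
  | succ k ih =>
    obtain ⟨hA, hne⟩ := ih
    rw [List.range_succ, List.foldl_append, List.foldl_append]
    simp only [List.foldl_cons, List.foldl_nil]
    rw [hA]
    by_cases hd : tokens.getD k "" = "-"
    · have hk0 : 0 < k := by
        rcases Nat.eq_zero_or_pos k with h | h
        · subst h; exact absurd hd h0
        · exact h
      rcases (List.foldl (ctGStep tokens) [] (List.range k)).eq_nil_or_concat with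
        hnil | ⟨l, a, hla⟩
      · exact absurd hnil (hne hk0)
      · rw [List.concat_eq_append] at hla
        rw [hla]
        simp only [List.getD_eq_getElem?_getD] at hd
        constructor
        · simp [ctAStep, ctGStep, ctBuild_concat, hd]
        · unfold ctGStep; split <;> simp
    · by_cases hm : 0 < k ∧ tokens.getD (k - 1) "" = "-"
      · rcases (List.foldl (ctGStep tokens) [] (List.range k)).eq_nil_or_concat with
          hnil | ⟨l, a, hla⟩
        · exact absurd hnil (hne hm.1)
        · rw [List.concat_eq_append] at hla
          rw [hla]
          have hk0 : ¬ (k = 0) := by omega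
          obtain ⟨-, hX⟩ := hm
          simp only [List.getD_eq_getElem?_getD] at hd hX
          constructor
          · simp [ctAStep, ctGStep, ctBuild_concat, hd, hX, hk0]
          · unfold ctGStep; split <;> simp
      · rcases Nat.eq_zero_or_pos k with hk0 | hk0
        · subst hk0
          simp only [List.getD_eq_getElem?_getD] at hd
          constructor
          · simp [ctAStep, ctGStep, ctBuild, hd]
          · unfold ctGStep; split <;> simp
        · have hX : tokens.getD (k - 1) "" ≠ "-" := fun hx => hm ⟨hk0, hx⟩
          have hk0' : ¬ (k = 0) := by omega
          simp only [List.getD_eq_getElem?_getD] at hd hX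
          constructor
          · simp [ctAStep, ctGStep, ctBuild, hd, hX, hk0']
          · unfold ctGStep; split <;> simp

lemma alt_fold (tokens : List String) (pos : List (String × String))
    (gs : List (List Nat)) (acc : List String × List (String × String)) :
    gs.foldl (fun r g => let b := ctBuild tokens pos g; (r.1 ++ [b.1], r.2 ++ [b.2])) acc =
      (acc.1 ++ gs.map (fun g => (ctBuild tokens pos g).1),
       acc.2 ++ gs.map (fun g => (ctBuild tokens pos g).2)) := by
  induction gs generalizing acc with
  | nil => simp
  | cons g gs ih => simp [ih]

-- ===== VERDICT (by name: the statement is the Claim_ definition above) =====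
theorem correct_tokens_py_spec : Claim_equal_correct_tokens_py := by
  intro tokens pos _ hpre
  unfold Spec_correct_tokens_py correct_tokens_py correct_tokens_py_alt ctGroups
  rw [(ct_inv tokens pos hpre.1 tokens.length).1, alt_fold]
  simp
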